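-- pv_equiv track=rewrite | github.com/Dieterdemuynck/Informatica5 | Toets 4/Vriend of kennis.py | bekendheid
-- ===== SOURCE A (Python) =====
-- def bekendheid(kennissen):
--     bekendheden = {}
--
--     for persoon in kennissen.keys():
--         bekendheden[persoon] = 0
--
--         for personen in kennissen.values():
--             if persoon in personen:
--                 bekendheden[persoon] += 1
--
--     return bekendheden
-- ===== SOURCE B (Python) =====
-- def bekendheid(kennissen):
--     # Build an appearance index once: for each acquaintance list, count each
--     # distinct name once; then project the counts over the dict's keys.
--     counts = {}
--     for personen in kennissen.values():
--         for p in set(personen):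
--             counts[p] = counts.get(p, 0) + 1
--     return {persoon: counts.get(persoon, 0) for persoon in kennissen}
-- ===== Notes on version B (the rewrite author's own statement) =====
-- stated objective: faster
-- what changed: Builds an inverted appearance index in one pass over the value lists (deduplicating each list with set), then projects the counts over the keys, instead of re-scanning every value list for every key.
import Mathlib
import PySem

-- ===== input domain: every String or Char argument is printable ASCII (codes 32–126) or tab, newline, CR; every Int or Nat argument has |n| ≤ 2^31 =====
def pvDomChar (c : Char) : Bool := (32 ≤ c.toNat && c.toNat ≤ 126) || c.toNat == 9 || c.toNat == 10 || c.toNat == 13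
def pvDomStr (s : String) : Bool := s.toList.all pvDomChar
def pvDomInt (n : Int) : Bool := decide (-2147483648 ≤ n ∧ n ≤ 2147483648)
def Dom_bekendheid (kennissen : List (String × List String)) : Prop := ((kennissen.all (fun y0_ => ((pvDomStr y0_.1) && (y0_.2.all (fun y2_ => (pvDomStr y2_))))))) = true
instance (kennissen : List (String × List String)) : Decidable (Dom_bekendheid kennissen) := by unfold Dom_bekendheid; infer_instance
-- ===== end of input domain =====

-- B replaces A's nested re-scan of every value list per key by a one-pass inverted
-- appearance index (counts) followed by a lookup pass over the keys (objective: faster).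

-- ===== PORT A =====
def bekendheid (kennissen : List (String × List String)) : List (String × Int) :=
  (kennissen.foldl
    (fun bekendheden persoon =>
      let bekendheden := bekendheden.insert persoon.1 0
      kennissen.foldl
        (fun bekendheden personen =>
          if persoon.1 ∈ personen.2 then
            bekendheden.insert persoon.1 (bekendheden.getD persoon.1 0 + 1)
          else bekendheden)
        bekendheden)
    (PySem.Dict.empty : PySem.Dict String Int)).items

-- ===== PORT B =====
def bekendheid_alt (kennissen : List (String × List String)) : List (String × Int) :=
  let counts : PySem.Dict String Int :=
    kennissen.foldl
      (fun counts personen =>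
        (PySem.Set.ofList personen.2).foldl
          (fun counts p => counts.insert p (counts.getD p 0 + 1))
          counts)
      PySem.Dict.empty
  (kennissen.foldl
    (fun out persoon => out.insert persoon.1 (counts.getD persoon.1 0))
    (PySem.Dict.empty : PySem.Dict String Int)).items

-- ===== PRECONDITION & SPEC =====
def Spec_bekendheid (kennissen : List (String × List String)) (out : List (String × Int)) : Prop := out = bekendheid_alt kennissen
instance (kennissen : List (String × List String)) (out : List (String × Int)) : Decidable (Spec_bekendheid kennissen out) := by unfold Spec_bekendheid; infer_instance

-- ===== CLAIM (what is proved, stated in full; the proofs are below) =====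
def Claim_equal_bekendheid : Prop := ∀ (kennissen : List (String × List String)), Dom_bekendheid kennissen → Spec_bekendheid kennissen (bekendheid kennissen)

-- ===== LEMMAS AND PROOFS =====

/-- Number of value lists in `ks` containing `p`. -/
def pvCnt (p : String) : List (String × List String) → Int
  | [] => 0
  | q :: ks => (if p ∈ q.2 then 1 else 0) + pvCnt p ks

/-- A's inner loop only updates key `p`; starting from `d.insert p v` it ends at
    `d.insert p (v + pvCnt p ks)`. -/
theorem pvInnerA (p : String) (ks : List (String × List String)) :
    ∀ (d : PySem.Dict String Int) (v : Int),
    ks.foldl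
      (fun bek q => if p ∈ q.2 then bek.insert p (bek.getD p 0 + 1) else bek)
      (d.insert p v) = d.insert p (v + pvCnt p ks) := by
  induction ks with
  | nil => intro d v; simp [pvCnt]
  | cons q ks ih =>
    intro d v
    simp only [List.foldl_cons, pvCnt]
    by_cases h : p ∈ q.2
    · rw [if_pos h, PySem.Dict.getD_insert_self, PySem.Dict.insert_insert_self, ih d (v + 1),
        if_pos h]
      ring_nf
    · rw [if_neg h, ih d v, if_neg h]
      ring_nf

/-- B's index lookup: the counts dict holds exactly `pvCnt`. -/
theorem pvCountsB (x : String) (ks : List (String × List String)) :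
    ∀ (c : PySem.Dict String Int),
    (ks.foldl
      (fun counts personen =>
        (PySem.Set.ofList personen.2).foldl
          (fun counts p => counts.insert p (counts.getD p 0 + 1)) counts)
      c).getD x 0 = c.getD x 0 + pvCnt x ks := by
  induction ks with
  | nil => intro c; simp [pvCnt]
  | cons q ks ih =>
    intro c
    simp only [List.foldl_cons, pvCnt]
    rw [ih, PySem.Dict.getD_foldl_insert_add_one]
    by_cases h : x ∈ q.2
    · have hm : x ∈ PySem.Set.ofList q.2 := (PySem.Set.mem_ofList q.2 x).mpr h
      rw [List.count_eq_one_of_mem (PySem.Set.nodup_ofList q.2) hm, if_pos h]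
      push_cast; ring
    · have hm : x ∉ PySem.Set.ofList q.2 := fun hx => h ((PySem.Set.mem_ofList q.2 x).mp hx)
      rw [List.count_eq_zero_of_not_mem hm, if_neg h]
      push_cast; ring

/-- A fold inserting `f p` for each key equals the same fold inserting `g p`
    when `f` and `g` agree. -/
theorem pvProjCongr (ks : List (String × List String))
    (f g : String × List String → Int) (h : ∀ p, f p = g p) :
    ∀ (acc : PySem.Dict String Int),
    ks.foldl (fun out p => out.insert p.1 (f p)) acc
      = ks.foldl (fun out p => out.insert p.1 (g p)) acc := by
  induction ks with
  | nil => intro acc; rfl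
  | cons q ks ih => intro acc; simp only [List.foldl_cons, h q]; exact ih _

/-- A's outer fold computes the projection of `pvCnt · ks0`. -/
theorem pvOuterA (ks0 : List (String × List String)) (ks : List (String × List String)) :
    ∀ (acc : PySem.Dict String Int),
    ks.foldl
      (fun bek persoon =>
        (ks0.foldl
          (fun b q => if persoon.1 ∈ q.2 then b.insert persoon.1 (b.getD persoon.1 0 + 1) else b)
          (bek.insert persoon.1 0)))
      acc
      = ks.foldl (fun out p => out.insert p.1 (pvCnt p.1 ks0)) acc := by
  induction ks with
  | nil => intro acc; rfl
  | cons q ks ih =>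
    intro acc
    simp only [List.foldl_cons]
    rw [pvInnerA q.1 ks0 acc 0, zero_add]
    exact ih _

-- ===== VERDICT (by name: the statement is the Claim_ definition above) =====
theorem bekendheid_spec : Claim_equal_bekendheid := by
  intro kennissen _
  show bekendheid kennissen = bekendheid_alt kennissen
  unfold bekendheid bekendheid_alt
  rw [pvOuterA kennissen kennissen PySem.Dict.empty]
  exact congrArg PySem.Dict.items
    (pvProjCongr kennissen (fun p => pvCnt p.1 kennissen) _
      (fun p => by rw [pvCountsB p.1 kennissen PySem.Dict.empty, PySem.Dict.getD_empty, zero_add])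
      PySem.Dict.empty)
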